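-- pv_equiv track=rewrite | github.com/mehdizebhi/processes-priority-algorithm | priority.py | select_highest_priority
-- ===== SOURCE A (Python) =====
-- def select_highest_priority(priority_queues):
--     selected_processes = None
--     priorities = list(priority_queues.keys())
--     priorities.sort(reverse=False)
--     for priority in priorities:
--         if len(priority_queues[priority]) > 0:
--             selected_processes = priority_queues[priority][0]
--             break
--         else:
--             continue
--
--     return selected_processes
-- ===== SOURCE B (Python) =====
-- def select_highest_priority(priority_queues):
--     candidates = [k for k in priority_queues if len(priority_queues[k]) > 0]
--     if not candidates:
--         return None
--     return priority_queues[min(candidates)][0]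
-- ===== Notes on version B (the rewrite author's own statement) =====
-- stated objective: simpler
-- what changed: Replaces sort-then-scan-with-break by a single filter of non-empty keys followed by min(), no sorting and no loop/break control flow.
import Mathlib
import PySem

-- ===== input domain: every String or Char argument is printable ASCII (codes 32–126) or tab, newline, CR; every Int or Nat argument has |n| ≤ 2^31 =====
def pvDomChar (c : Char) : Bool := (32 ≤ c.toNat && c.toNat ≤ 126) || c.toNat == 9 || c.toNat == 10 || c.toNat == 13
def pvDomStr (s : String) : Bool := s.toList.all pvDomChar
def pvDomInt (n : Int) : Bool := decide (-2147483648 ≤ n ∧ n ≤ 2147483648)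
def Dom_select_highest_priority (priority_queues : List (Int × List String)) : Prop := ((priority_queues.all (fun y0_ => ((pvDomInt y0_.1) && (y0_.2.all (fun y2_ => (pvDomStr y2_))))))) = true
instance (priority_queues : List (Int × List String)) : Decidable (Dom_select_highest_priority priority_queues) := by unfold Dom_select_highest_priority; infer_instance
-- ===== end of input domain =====

-- B replaces A's sort-then-scan-with-break by filtering the non-empty keys and taking min(): simpler, no sort.

-- ===== PORT A =====
-- the for-loop with break: first sorted priority whose queue is non-empty
def pvALoop (priority_queues : List (Int × List String)) : List Int → Option String
  | [] => none
  | p :: rest =>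
    if ((List.lookup p priority_queues).getD []).length > 0 then
      PySem.List.pyGet? ((List.lookup p priority_queues).getD []) 0
    else
      pvALoop priority_queues rest

def select_highest_priority (priority_queues : List (Int × List String)) : Option String :=
  let priorities := PySem.List.sorted (priority_queues.map (·.1)) (fun x => x) false
  pvALoop priority_queues priorities

-- ===== PORT B =====
def select_highest_priority_alt (priority_queues : List (Int × List String)) : Option String :=
  let candidates := (priority_queues.map (·.1)).filter
    (fun k => ((List.lookup k priority_queues).getD []).length > 0)
  match PySem.List.min? candidates (fun x => x) with
  | none => none
  | some m => PySem.List.pyGet? ((List.lookup m priority_queues).getD []) 0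

-- ===== PRECONDITION & SPEC =====
def Spec_select_highest_priority (priority_queues : List (Int × List String)) (out : Option String) : Prop := out = select_highest_priority_alt priority_queues
instance (priority_queues : List (Int × List String)) (out : Option String) : Decidable (Spec_select_highest_priority priority_queues out) := by unfold Spec_select_highest_priority; infer_instance

-- ===== CLAIM (what is proved, stated in full; the proofs are below) =====
def Claim_equal_select_highest_priority : Prop := ∀ (priority_queues : List (Int × List String)), Dom_select_highest_priority priority_queues → Spec_select_highest_priority priority_queues (select_highest_priority priority_queues)

-- ===== LEMMAS AND PROOFS =====

-- A's loop is find? followed by the head lookup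
theorem pvALoop_eq_find (pq : List (Int × List String)) (l : List Int) :
    pvALoop pq l =
      (l.find? (fun k => ((List.lookup k pq).getD []).length > 0)).bind
        (fun m => PySem.List.pyGet? ((List.lookup m pq).getD []) 0) := by
  induction l with
  | nil => rfl
  | cons p rest ih =>
    by_cases h : ((List.lookup p pq).getD []).length > 0
    · simp [pvALoop, List.find?, h]
    · simp [pvALoop, List.find?, h, ih]

-- on a ≤-sorted list, find? returns a minimal satisfying element
theorem find?_min {p : Int → Bool} {l : List Int} {a : Int}
    (hs : l.Pairwise (· ≤ ·)) (hf : l.find? p = some a) :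
    ∀ b ∈ l, p b → a ≤ b := by
  induction l with
  | nil => simp at hf
  | cons x t ih =>
    rcases List.pairwise_cons.mp hs with ⟨hx, ht⟩
    by_cases hpx : p x
    · simp [List.find?, hpx] at hf
      subst hf
      intro b hb _
      rcases List.mem_cons.mp hb with rfl | hb
      · exact le_refl _
      · exact hx _ hb
    · simp [List.find?, hpx] at hf
      intro b hb hpb
      rcases List.mem_cons.mp hb with rfl | hb
      · exact absurd hpb (by simpa using hpx)
      · exact ih ht hf b hb hpb

theorem select_highest_priority_eq (pq : List (Int × List String)) :
    select_highest_priority pq = select_highest_priority_alt pq := by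
  simp only [select_highest_priority, select_highest_priority_alt, pvALoop_eq_find]
  set p : Int → Bool := fun k => ((List.lookup k pq).getD []).length > 0 with hp
  set keys : List Int := pq.map (·.1) with hk
  set s : List Int := PySem.List.sorted keys (fun x => x) false with hs
  have hperm : s.Perm keys := PySem.List.sorted_perm ..
  have hpw : s.Pairwise (fun a b => a ≤ b) := PySem.List.sorted_pairwise ..
  cases hmin : PySem.List.min? (keys.filter p) (fun x => x) with
  | none =>
    have hfil : keys.filter p = [] := (PySem.List.min?_eq_none_iff _ _).mp hmin
    have hnone : s.find? p = none := by
      rw [List.find?_eq_none]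
      intro x hx hpx
      have hxk : x ∈ keys := hperm.mem_iff.mp hx
      have : x ∈ keys.filter p := List.mem_filter.mpr ⟨hxk, hpx⟩
      simp [hfil] at this
    simp [hnone]
  | some m =>
    have hm_mem : m ∈ keys.filter p := PySem.List.min?_mem hmin
    have hm_keys : m ∈ keys := (List.mem_filter.mp hm_mem).1
    have hpm : p m := (List.mem_filter.mp hm_mem).2
    have hm_s : m ∈ s := hperm.mem_iff.mpr hm_keys
    have hsome : (s.find? p).isSome := List.find?_isSome.mpr ⟨m, hm_s, hpm⟩
    rcases Option.isSome_iff_exists.mp hsome with ⟨a, hfa⟩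
    have hpa : p a := List.find?_some hfa
    have ha_s : a ∈ s := List.mem_of_find?_eq_some hfa
    have ha_keys : a ∈ keys := hperm.mem_iff.mp ha_s
    have h1 : a ≤ m := find?_min hpw hfa m hm_s hpm
    have h2 : m ≤ a := by
      have := PySem.List.min?_isMin hmin a (List.mem_filter.mpr ⟨ha_keys, hpa⟩)
      simpa using this
    have : a = m := le_antisymm h1 h2
    subst this
    simp [hfa]

-- ===== VERDICT (by name: the statement is the Claim_ definition above) =====
theorem select_highest_priority_spec : Claim_equal_select_highest_priority := by
  intro pq _
  exact (select_highest_priority_eq pq).symm ▸ rfl
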